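-- pv_equiv track=rewrite | github.com/Muhammadali-Akbarov/fastgram | app/bot/services/external/aiogram/button/markup/default.py | create_keyboard_layout
-- ===== SOURCE A (Python) =====
-- from typing import Sequence, TypeVar, Dict
--
-- T = TypeVar("T")
--
-- def create_keyboard_layout(
--
--     buttons: Sequence[T],
--     count: Sequence[int]
-- ) -> list[list[T]]:
--     """
--     create markup buttons
--     """
--     if sum(count) != len(buttons):
--         raise ValueError("Количество кнопок не совпадает со схемой")
--     tmplist: list[list[T]] = []
--     btn_number = 0
--
--     for a in count:
--         tmplist.append([])
--         for _ in range(a):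
--             tmplist[-1].append(buttons[btn_number])
--             btn_number += 1
--
--     return tmplist
-- ===== SOURCE B (Python) =====
-- def create_keyboard_layout(buttons, count):
--     """
--     create markup buttons
--     """
--     if sum(count) != len(buttons):
--         raise ValueError("Количество кнопок не совпадает со схемой")
--     rows = []
--     offset = 0
--     for a in count:
--         rows.append(list(buttons[offset:offset + a]))
--         offset += a
--     return rows
-- ===== Notes on version B (the rewrite author's own statement) =====
-- stated objective: simpler
-- what changed: Replaces the nested per-element append loop with a running offset and one slice extraction per row, removing the inner loop and index counter.
import Mathlib
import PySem

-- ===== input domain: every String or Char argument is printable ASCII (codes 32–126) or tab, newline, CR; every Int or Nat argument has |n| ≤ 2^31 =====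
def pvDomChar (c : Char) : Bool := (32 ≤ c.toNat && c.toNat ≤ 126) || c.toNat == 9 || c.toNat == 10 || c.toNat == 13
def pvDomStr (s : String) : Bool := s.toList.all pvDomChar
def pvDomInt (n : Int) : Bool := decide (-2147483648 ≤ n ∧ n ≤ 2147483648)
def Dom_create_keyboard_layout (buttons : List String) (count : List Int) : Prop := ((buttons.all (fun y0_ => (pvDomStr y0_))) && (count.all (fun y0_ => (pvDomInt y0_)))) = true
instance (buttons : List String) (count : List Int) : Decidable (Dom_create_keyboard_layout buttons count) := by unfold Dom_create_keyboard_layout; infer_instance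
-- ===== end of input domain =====

-- B replaces A's nested per-element append loop with a running offset and one slice per row (same cost, simpler).


-- ===== PORT A =====
-- literal port of A: guard, then for each a append an empty row and fill it element by
-- element with buttons[btn_number]; where Python raises (guard, IndexError) Pre_ excludes.
def create_keyboard_layout (buttons : List String) (count : List Int) : List (List String) :=
  if count.sum ≠ (buttons.length : Int) then []   -- Python: raise ValueError (excluded by Pre_)
  else
    (count.foldl (fun (st : List (List String) × Int) (a : Int) =>
      (PySem.List.pyRange 0 a 1).foldl
        (fun (st2 : List (List String) × Int) _ =>
          (st2.1.dropLast ++ [st2.1.getLast?.getD [] ++ [PySem.List.pyGetD buttons st2.2 ""]],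
           st2.2 + 1))
        (st.1 ++ [([] : List String)], st.2))
      ([], 0)).1

-- ===== PORT B =====
-- literal port of B: one pass over count keeping a running offset, each row is a slice.
def create_keyboard_layout_alt (buttons : List String) (count : List Int) : List (List String) :=
  if count.sum ≠ (buttons.length : Int) then []   -- Python: raise ValueError (excluded by Pre_)
  else
    (count.foldl (fun (st : List (List String) × Int) (a : Int) =>
      (st.1 ++ [PySem.List.slice buttons (some st.2) (some (st.2 + a))], st.2 + a))
      ([], 0)).1

-- ===== PRECONDITION & SPEC =====
-- Pre_ is exactly where Python A returns: sum(count) = len(buttons) (else ValueError) and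
-- no negative count (a negative count with matching sum makes the positive counts overrun
-- the button list, so A raises IndexError).
def Pre_create_keyboard_layout (buttons : List String) (count : List Int) : Prop :=
  count.sum = (buttons.length : Int) ∧ ∀ a ∈ count, 0 ≤ a
instance (buttons : List String) (count : List Int) : Decidable (Pre_create_keyboard_layout buttons count) := by unfold Pre_create_keyboard_layout; infer_instance
def pvWitness_create_keyboard_layout : List String × List Int := (["a", "b", "c"], [2, 1])


def Spec_create_keyboard_layout (buttons : List String) (count : List Int) (out : List (List String)) : Prop := out = create_keyboard_layout_alt buttons count
instance (buttons : List String) (count : List Int) (out : List (List String)) : Decidable (Spec_create_keyboard_layout buttons count out) := by unfold Spec_create_keyboard_layout; infer_instance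

-- ===== CLAIM (what is proved, stated in full; the proofs are below) =====
def Claim_equal_create_keyboard_layout : Prop := ∀ (buttons : List String) (count : List Int), Dom_create_keyboard_layout buttons count → Pre_create_keyboard_layout buttons count → Spec_create_keyboard_layout buttons count (create_keyboard_layout buttons count)

-- ===== LEMMAS AND PROOFS =====

-- A's inner loop, started on a state whose last row is r and whose counter is i,
-- appends buttons[i..i+n) to r and advances the counter by n.
theorem innerA (buttons : List String) (n i : Nat) (rows : List (List String)) (r : List String)
    (h : i + n ≤ buttons.length) :
    (PySem.List.pyRange 0 (n : Int) 1).foldl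
      (fun (st2 : List (List String) × Int) _ =>
        (st2.1.dropLast ++ [st2.1.getLast?.getD [] ++ [PySem.List.pyGetD buttons st2.2 ""]],
         st2.2 + 1))
      (rows ++ [r], (i : Int))
    = (rows ++ [r ++ (buttons.drop i).take n], (i : Int) + n) := by
  induction n generalizing r with
  | zero => simp [PySem.List.pyRange]
  | succ m ih =>
    have hb : (0 : Int) ≤ (m : Int) := by positivity
    have : ((m : Int) + 1) = (((m + 1 : Nat)) : Int) := by push_cast; ring
    rw [show ((m + 1 : Nat) : Int) = (m : Int) + 1 by push_cast; ring,
        PySem.List.pyRange_one_succ_right hb, List.foldl_append]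
    rw [ih r (by omega)]
    simp only [List.foldl_cons, List.foldl_nil]
    have hidx : i + m < buttons.length := by omega
    have hget : PySem.List.pyGetD buttons ((i : Int) + m) "" = buttons[i + m] := by
      rw [show ((i : Int) + m) = ((i + m : Nat) : Int) by push_cast; ring,
          PySem.List.pyGetD_natCast]
      simp [List.getD, hidx]
    have htake : (buttons.drop i).take (m + 1) = (buttons.drop i).take m ++ [buttons[i + m]] := by
      rw [List.take_add_one]
      simp [List.getElem?_drop]
    rw [hget, htake]
    refine Prod.ext ?_ ?_
    · simp
    · push_cast; ring

-- the two folds agree from any shared (rows, nonnegative offset) state when the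
-- remaining counts are nonnegative and fit in the buttons list
theorem fold_eq (buttons : List String) (cs : List Int) (rows : List (List String)) (i : Nat)
    (hnn : ∀ a ∈ cs, 0 ≤ a) (hfit : (i : Int) + cs.sum ≤ (buttons.length : Int)) :
    cs.foldl (fun (st : List (List String) × Int) (a : Int) =>
      (PySem.List.pyRange 0 a 1).foldl
        (fun (st2 : List (List String) × Int) _ =>
          (st2.1.dropLast ++ [st2.1.getLast?.getD [] ++ [PySem.List.pyGetD buttons st2.2 ""]],
           st2.2 + 1))
        (st.1 ++ [([] : List String)], st.2)) (rows, (i : Int))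
    = cs.foldl (fun (st : List (List String) × Int) (a : Int) =>
        (st.1 ++ [PySem.List.slice buttons (some st.2) (some (st.2 + a))], st.2 + a))
        (rows, (i : Int)) := by
  induction cs generalizing rows i with
  | nil => rfl
  | cons a tl ih =>
    have ha : 0 ≤ a := hnn a (by simp)
    have htl : 0 ≤ tl.sum := List.sum_nonneg (fun x hx => hnn x (by simp [hx]))
    have hsum : (a :: tl).sum = a + tl.sum := by simp
    have hfit1 : i + a.toNat ≤ buttons.length := by
      have := hfit; rw [hsum] at this; omega
    simp only [List.foldl_cons]
    rw [show a = (a.toNat : Int) from by omega]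
    rw [innerA buttons a.toNat i rows [] hfit1]
    have hslice : PySem.List.slice buttons (some (i : Int)) (some ((i : Int) + a.toNat))
        = (buttons.drop i).take a.toNat := by
      rw [show ((i : Int) + (a.toNat : Int)) = ((i + a.toNat : Nat) : Int) by push_cast; ring,
          PySem.List.slice_natCast]
      congr 1; omega
    rw [show ((i : Int) + (a.toNat : Int)) = ((i + a.toNat : Nat) : Int) by push_cast; ring]
    rw [ih (rows ++ [[] ++ (buttons.drop i).take a.toNat]) (i + a.toNat)
        (fun x hx => hnn x (by simp [hx]))
        (by rw [hsum] at hfit; push_cast; omega)]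
    congr 2
    rw [show ((i + a.toNat : Nat) : Int) = (i : Int) + (a.toNat : Int) by push_cast; ring, hslice]
    simp

-- ===== VERDICT (by name: the statement is the Claim_ definition above) =====
theorem create_keyboard_layout_spec : Claim_equal_create_keyboard_layout := by
  intro buttons count _ hpre
  obtain ⟨hsum, hnn⟩ := hpre
  unfold Spec_create_keyboard_layout create_keyboard_layout create_keyboard_layout_alt
  rw [if_neg (by simp [hsum]), if_neg (by simp [hsum])]
  have h := fold_eq buttons count [] 0 hnn (by simp [hsum])
  simp only [Nat.cast_zero] at h
  rw [h]
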